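-- pv_equiv track=rewrite | github.com/ignacio-design/orquesta | auto_capture_leads.py | extract_lead_from_conversation
-- ===== SOURCE A (Python) =====
-- def extract_lead_from_conversation(conversacion):
--     """
--     Extrae datos de lead de una conversación
--     Busca patrones como:
--     - Empresa: oftalmología, e-commerce, etc.
--     - Servicio: WhatsApp, CRM, etc.
--     - Empleados: número
--     """
--
--     # Buscar nombre
--     nombre = "Lead"
--     apellido = "Orquesta"
--
--     # Buscar empresa en el contexto
--     empresa = "No especificada"
--     servicio = "Consultoría"
--
--     # Patrones a buscar en la conversación
--     for linea in conversacion: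
--         texto = linea.lower()
--
--         # Empresa
--         if "empresa" in texto or "se dedica" in texto:
--             # Siguiente línea probablemente tenga la respuesta
--             empresa = linea
--
--         # Servicio
--         if "automatizar" in texto or "mejorar" in texto:
--             if "whatsapp" in texto:
--                 servicio = "Automatización WhatsApp"
--             elif "crm" in texto:
--                 servicio = "Automatización CRM"
--             elif "ecommerce" in texto:
--                 servicio = "Consultoría E-commerce"
--
--     return nombre, apellido, empresa, servicio
-- ===== SOURCE B (Python) =====
-- def extract_lead_from_conversation(conversacion):
--     # Two independent last-match reverse scans instead of one fused forward loop.
--     empresa = "No especificada"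
--     for linea in reversed(conversacion):
--         t = linea.lower()
--         if "empresa" in t or "se dedica" in t:
--             empresa = linea
--             break
--     servicio = "Consultoría"
--     for linea in reversed(conversacion):
--         t = linea.lower()
--         if ("automatizar" in t or "mejorar" in t) and (
--             "whatsapp" in t or "crm" in t or "ecommerce" in t
--         ):
--             if "whatsapp" in t:
--                 servicio = "Automatización WhatsApp"
--             elif "crm" in t:
--                 servicio = "Automatización CRM"
--             else:
--                 servicio = "Consultoría E-commerce"
--             break
--     return "Lead", "Orquesta", empresa, servicio
-- ===== Notes on version B (the rewrite author's own statement) =====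
-- stated objective: alternative
-- what changed: Replaced A's single fused forward fold threading (empresa, servicio) state through every line by two independent reverse scans that each stop at the first (i.e. last) matching line, with the servicio keyword test and its whatsapp>crm>ecommerce priority mapping separated into a predicate and a mapper.
import Mathlib
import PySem

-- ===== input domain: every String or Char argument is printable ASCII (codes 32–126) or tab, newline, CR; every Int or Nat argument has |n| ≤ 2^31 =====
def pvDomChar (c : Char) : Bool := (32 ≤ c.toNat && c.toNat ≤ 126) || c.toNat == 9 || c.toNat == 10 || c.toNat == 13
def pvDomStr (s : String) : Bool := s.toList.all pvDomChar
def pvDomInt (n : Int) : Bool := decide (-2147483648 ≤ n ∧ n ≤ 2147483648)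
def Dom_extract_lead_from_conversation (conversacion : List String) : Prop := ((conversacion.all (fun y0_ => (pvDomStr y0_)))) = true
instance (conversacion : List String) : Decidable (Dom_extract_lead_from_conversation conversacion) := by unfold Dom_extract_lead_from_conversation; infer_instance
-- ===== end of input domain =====

-- B replaces A's single fused forward fold by two independent last-match reverse scans (alternative decomposition, same cost).


-- ===== PORT A =====
-- A: one forward fold threading (empresa, servicio) state through every line.
def pvStepA (st : String × String) (linea : String) : String × String :=
  let texto := PySem.Str.lower linea
  let empresa := if PySem.Str.isIn "empresa" texto || PySem.Str.isIn "se dedica" texto then linea else st.1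
  let servicio :=
    if PySem.Str.isIn "automatizar" texto || PySem.Str.isIn "mejorar" texto then
      if PySem.Str.isIn "whatsapp" texto then "Automatización WhatsApp"
      else if PySem.Str.isIn "crm" texto then "Automatización CRM"
      else if PySem.Str.isIn "ecommerce" texto then "Consultoría E-commerce"
      else st.2
    else st.2
  (empresa, servicio)

def extract_lead_from_conversation (conversacion : List String) : String × String × String × String :=
  let res := conversacion.foldl pvStepA ("No especificada", "Consultoría")
  ("Lead", "Orquesta", res.1, res.2)

-- ===== PORT B =====
-- B: two independent reverse scans (first match of the reversed list = last match), predicate + mapper.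
def pvEmpHit (linea : String) : Bool :=
  let t := PySem.Str.lower linea
  PySem.Str.isIn "empresa" t || PySem.Str.isIn "se dedica" t

def pvSrvHit (linea : String) : Bool :=
  let t := PySem.Str.lower linea
  (PySem.Str.isIn "automatizar" t || PySem.Str.isIn "mejorar" t) &&
    (PySem.Str.isIn "whatsapp" t || PySem.Str.isIn "crm" t || PySem.Str.isIn "ecommerce" t)

def pvSrvMap (linea : String) : String :=
  let t := PySem.Str.lower linea
  if PySem.Str.isIn "whatsapp" t then "Automatización WhatsApp"
  else if PySem.Str.isIn "crm" t then "Automatización CRM"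
  else "Consultoría E-commerce"

def extract_lead_from_conversation_alt (conversacion : List String) : String × String × String × String :=
  let empresa := match conversacion.reverse.find? pvEmpHit with
    | some l => l
    | none => "No especificada"
  let servicio := match conversacion.reverse.find? pvSrvHit with
    | some l => pvSrvMap l
    | none => "Consultoría"
  ("Lead", "Orquesta", empresa, servicio)

-- ===== PRECONDITION & SPEC =====
def Spec_extract_lead_from_conversation (conversacion : List String) (out : String × String × String × String) : Prop := out = extract_lead_from_conversation_alt conversacion
instance (conversacion : List String) (out : String × String × String × String) : Decidable (Spec_extract_lead_from_conversation conversacion out) := by unfold Spec_extract_lead_from_conversation; infer_instance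

-- ===== CLAIM (what is proved, stated in full; the proofs are below) =====
def Claim_equal_extract_lead_from_conversation : Prop := ∀ (conversacion : List String), Dom_extract_lead_from_conversation conversacion → Spec_extract_lead_from_conversation conversacion (extract_lead_from_conversation conversacion)

-- ===== LEMMAS AND PROOFS =====

-- One step of A's fold, phrased through B's predicate/mapper decomposition.
theorem pv_step_eq (e s x : String) :
    pvStepA (e, s) x = ((if pvEmpHit x then x else e), if pvSrvHit x then pvSrvMap x else s) := by
  simp only [pvStepA, pvEmpHit, pvSrvHit, pvSrvMap]
  by_cases h1 : PySem.Chars.isIn ['w','h','a','t','s','a','p','p'] (PySem.Chars.lower x.toList) = true <;>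
  by_cases h2 : PySem.Chars.isIn ['c','r','m'] (PySem.Chars.lower x.toList) = true <;>
  by_cases h3 : PySem.Chars.isIn ['e','c','o','m','m','e','r','c','e'] (PySem.Chars.lower x.toList) = true <;>
  by_cases h4 : PySem.Chars.isIn ['a','u','t','o','m','a','t','i','z','a','r'] (PySem.Chars.lower x.toList) = true <;>
  by_cases h5 : PySem.Chars.isIn ['m','e','j','o','r','a','r'] (PySem.Chars.lower x.toList) = true <;>
  simp [h1, h2, h3, h4, h5]

-- A's fused fold computes exactly B's two last-match searches, for any accumulator.
theorem pv_fold_eq (l : List String) (e s : String) :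
    l.foldl pvStepA (e, s) =
      ((match l.reverse.find? pvEmpHit with | some x => x | none => e),
       (match l.reverse.find? pvSrvHit with | some x => pvSrvMap x | none => s)) := by
  induction l generalizing e s with
  | nil => simp
  | cons x xs ih =>
    rw [List.foldl_cons, pv_step_eq, ih]
    simp only [List.reverse_cons, List.find?_append]
    cases hE : xs.reverse.find? pvEmpHit <;> cases hS : xs.reverse.find? pvSrvHit <;>
      by_cases hx : pvEmpHit x = true <;> by_cases hy : pvSrvHit x = true <;>
      simp_all

-- ===== VERDICT (by name: the statement is the Claim_ definition above) =====
theorem extract_lead_from_conversation_spec : Claim_equal_extract_lead_from_conversation := by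
  intro conv _
  show _ = _
  simp only [extract_lead_from_conversation, extract_lead_from_conversation_alt, pv_fold_eq]
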